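-- pv_equiv track=rewrite | github.com/AnubisLMS/Anubis | theia/ide/admin/cli/anubis/assignment/utils.py | search_lines
-- ===== SOURCE A (Python) =====
-- import typing
--
-- def search_lines(
--         stdout_lines: typing.List[str],
--         expected_lines: typing.List[str],
--         case_sensitive: bool = True
-- ) -> bool:
--     """
--     Search lines for expected lines. This will return true if all expected lines are in the
--     student standard out lines in order. There can be interruptions in the student standard out.
--     This function has the advantage of allowing students to still print out debugging lines
--     while their output is still accurately checked for  the expected result.
--
--     >>> search_lines(['a', 'b', 'c'], ['a', 'b', 'c']) -> True
--     >>> search_lines(['a', 'debugging', 'b', 'c'], ['a', 'b', 'c']) -> True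
--     >>> search_lines(['a', 'b'],      ['a', 'b', 'c']) -> False
--
--     * Optionally specify if the equality comparison should be case sensitive *
--
--     :param stdout_lines:
--     :param expected_lines:
--     :param case_sensitive:
--     :return:
--     """
--
--     if not case_sensitive:
--         stdout_lines = list(map(lambda x: x.lower(), stdout_lines))
--     found = []
--     for line in expected_lines:
--         l = line.strip()
--         if not case_sensitive:
--             l = l.lower()
--         for _aindex, _aline in enumerate(stdout_lines):
--             if l in _aline:
--                 found.append(_aindex)
--                 break
--         else:
--             found.append(-1)
--     if -1 in found:
--         return False
--     return list(sorted(found)) == found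
-- ===== SOURCE B (Python) =====
-- def search_lines(stdout_lines, expected_lines, case_sensitive=True):
--     if not case_sensitive:
--         stdout_lines = [s.lower() for s in stdout_lines]
--     prev = 0
--     for line in expected_lines:
--         needle = line.strip()
--         if not case_sensitive:
--             needle = needle.lower()
--         idx = next((i for i, s in enumerate(stdout_lines) if needle in s), -1)
--         if idx < prev:
--             return False
--         prev = idx
--     return True
-- ===== Notes on version B (the rewrite author's own statement) =====
-- stated objective: simpler
-- what changed: Replaces A's collect-all-indices list plus the final '-1 in found' and 'sorted(found)==found' checks with a single fused pass keeping one integer prev that returns False immediately when a needle is missing or out of order, so failing inputs stop at the first bad expected line instead of scanning stdout for every remaining one.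
import Mathlib
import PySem

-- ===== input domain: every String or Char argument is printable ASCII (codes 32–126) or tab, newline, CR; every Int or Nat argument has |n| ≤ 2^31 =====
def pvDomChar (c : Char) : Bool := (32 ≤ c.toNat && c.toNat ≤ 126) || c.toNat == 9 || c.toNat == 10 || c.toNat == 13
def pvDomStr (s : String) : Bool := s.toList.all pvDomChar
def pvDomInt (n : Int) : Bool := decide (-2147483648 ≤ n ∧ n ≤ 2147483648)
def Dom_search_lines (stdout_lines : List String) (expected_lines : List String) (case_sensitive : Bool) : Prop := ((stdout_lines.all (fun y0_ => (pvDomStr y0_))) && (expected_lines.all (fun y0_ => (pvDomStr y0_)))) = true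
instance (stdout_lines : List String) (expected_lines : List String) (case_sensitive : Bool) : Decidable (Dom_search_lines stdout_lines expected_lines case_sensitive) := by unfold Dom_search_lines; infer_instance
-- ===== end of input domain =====

-- B fuses A's found-list construction and its two final checks (-1 membership, sorted==) into
-- one early-exiting pass over expected_lines keeping a single previous index (objective: simpler).


-- ===== PORT A =====
-- the inner 'for _aindex, _aline in enumerate(stdout_lines): if l in _aline: … break / else: -1'
def pvFindA (pairs : List (Int × String)) (l : String) : Int :=
  match pairs with
  | [] => -1
  | (i, s) :: rest => if PySem.Str.isIn l s then i else pvFindA rest l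

def search_lines (stdout_lines : List String) (expected_lines : List String) (case_sensitive : Bool) : Bool :=
  let sl := if !case_sensitive then stdout_lines.map PySem.Str.lower else stdout_lines
  let found := expected_lines.foldl (fun acc line =>
    let l := PySem.Str.strip line
    let l := if !case_sensitive then PySem.Str.lower l else l
    acc ++ [pvFindA (PySem.List.enumerate sl 0) l]) []
  if (-1 : Int) ∈ found then false
  else decide (PySem.List.sorted found (fun x => x) false = found)

-- ===== PORT B =====
-- next((i for i, s in enumerate(stdout_lines) if needle in s), -1), as an index-counting scan
def pvFirstIdx (xs : List String) (needle : String) (i : Int) : Int :=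
  match xs with
  | [] => -1
  | s :: rest => if PySem.Str.isIn needle s then i else pvFirstIdx rest needle (i + 1)

def pvAltGo (sl : List String) (case_sensitive : Bool) (rest : List String) (prev : Int) : Bool :=
  match rest with
  | [] => true
  | line :: rest' =>
    let needle := PySem.Str.strip line
    let needle := if !case_sensitive then PySem.Str.lower needle else needle
    let idx := pvFirstIdx sl needle 0
    if idx < prev then false else pvAltGo sl case_sensitive rest' idx

def search_lines_alt (stdout_lines : List String) (expected_lines : List String) (case_sensitive : Bool) : Bool :=
  let sl := if !case_sensitive then stdout_lines.map PySem.Str.lower else stdout_lines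
  pvAltGo sl case_sensitive expected_lines 0

-- ===== PRECONDITION & SPEC =====
def Spec_search_lines (stdout_lines : List String) (expected_lines : List String) (case_sensitive : Bool) (out : Bool) : Prop := out = search_lines_alt stdout_lines expected_lines case_sensitive
instance (stdout_lines : List String) (expected_lines : List String) (case_sensitive : Bool) (out : Bool) : Decidable (Spec_search_lines stdout_lines expected_lines case_sensitive out) := by unfold Spec_search_lines; infer_instance

-- ===== CLAIM (what is proved, stated in full; the proofs are below) =====
def Claim_equal_search_lines : Prop := ∀ (stdout_lines : List String) (expected_lines : List String) (case_sensitive : Bool), Dom_search_lines stdout_lines expected_lines case_sensitive → Spec_search_lines stdout_lines expected_lines case_sensitive (search_lines stdout_lines expected_lines case_sensitive)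

-- ===== LEMMAS AND PROOFS =====

-- both inner scans compute the same first-match index
theorem pvFindA_eq_firstIdx (xs : List String) (l : String) (s : Int) :
    pvFindA (PySem.List.enumerate xs s) l = pvFirstIdx xs l s := by
  induction xs generalizing s with
  | nil => rfl
  | cons x rest ih =>
    rw [PySem.List.enumerate_cons]
    simp only [pvFindA, pvFirstIdx]
    split <;> simp [ih]

theorem neg_one_le_pvFirstIdx (xs : List String) (l : String) (s : Int) (hs : 0 ≤ s) :
    -1 ≤ pvFirstIdx xs l s := by
  induction xs generalizing s with
  | nil => simp [pvFirstIdx]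
  | cons x rest ih =>
    simp only [pvFirstIdx]
    split
    · omega
    · exact ih (s + 1) (by omega)

-- characterisation of B's fused loop in terms of the list of first-match indices
theorem pvChain_char (sl : List String) (cs : Bool)
    (f : String → Int) (hf : ∀ l, -1 ≤ f l)
    (hfd : ∀ l, pvFirstIdx sl (if !cs then PySem.Str.lower (PySem.Str.strip l) else PySem.Str.strip l) 0 = f l) :
    ∀ (rest : List String) (prev : Int), 0 ≤ prev →
      (pvAltGo sl cs rest prev = true ↔
        ((-1 : Int) ∉ rest.map f ∧ List.IsChain (· ≤ ·) (prev :: rest.map f))) := by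
  intro rest
  induction rest with
  | nil => simp [pvAltGo]
  | cons line rest' ih =>
    intro prev hprev
    simp only [pvAltGo, List.map_cons, List.mem_cons, List.isChain_cons_cons]
    rw [hfd line]
    by_cases h : f line < prev
    · simp only [h, if_true]
      constructor
      · intro hfalse; exact absurd hfalse (by simp)
      · rintro ⟨-, hle, -⟩; omega
    · simp only [h, if_false]
      have h0 : 0 ≤ f line := by have := hf line; omega
      rw [ih (f line) h0]
      constructor
      · rintro ⟨hnm, hch⟩
        refine ⟨?_, by omega, hch⟩
        push Not
        exact ⟨by omega, hnm⟩
      · rintro ⟨hnm, -, hch⟩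
        push Not at hnm
        exact ⟨hnm.2, hch⟩

theorem search_lines_spec : Claim_equal_search_lines := by
  intro sl0 el cs _
  unfold Spec_search_lines
  simp only [search_lines, search_lines_alt]
  set sl := if !cs then sl0.map PySem.Str.lower else sl0 with hsl
  set f : String → Int := fun line =>
    pvFirstIdx sl (if !cs then PySem.Str.lower (PySem.Str.strip line) else PySem.Str.strip line) 0 with hfdef
  have hf : ∀ l, -1 ≤ f l := fun l => neg_one_le_pvFirstIdx _ _ 0 le_rfl
  have hfold : el.foldl (fun acc line =>
      let l := PySem.Str.strip line
      let l := if !cs then PySem.Str.lower l else l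
      acc ++ [pvFindA (PySem.List.enumerate sl 0) l]) [] = el.map f := by
    rw [PySem.List.foldl_append_singleton_eq_map]
    refine List.map_congr_left ?_
    intro line _
    simp only [hfdef, pvFindA_eq_firstIdx]
  have hmem : ∀ x ∈ el.map f, -1 ≤ x := by
    intro x hx
    rcases List.mem_map.mp hx with ⟨l, -, rfl⟩
    exact hf l
  rw [hfold, Bool.eq_iff_iff]
  rw [pvChain_char sl cs f hf (fun l => rfl) el 0 le_rfl]
  by_cases hneg : (-1 : Int) ∈ el.map f
  · simp [hneg]
  · simp only [hneg, if_false, decide_eq_true_eq, not_false_iff, true_and]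
    constructor
    · intro hsorted
      have hpw : (el.map f).Pairwise (· ≤ ·) := by
        have := PySem.List.sorted_pairwise (xs := el.map f) (key := fun x => x)
        rwa [hsorted] at this
      cases hx : el.map f with
      | nil => simp
      | cons a t =>
        rw [hx] at hpw
        have ha : 0 ≤ a := by
          have h1 : -1 ≤ a := hmem a (by rw [hx]; exact List.mem_cons_self)
          have h2 : a ≠ -1 := fun h => hneg (by rw [hx, ← h]; exact List.mem_cons_self)
          omega
        exact List.isChain_cons_cons.mpr ⟨ha, List.isChain_iff_pairwise.mpr hpw⟩
    · intro hch
      apply PySem.List.sorted_eq_self_of_pairwise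
      cases hx : el.map f with
      | nil => simp
      | cons a t =>
        rw [hx] at hch
        exact List.isChain_iff_pairwise.mp (List.isChain_cons_cons.mp hch).2
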